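-- pv_equiv track=rewrite | github.com/bae1022/Coding-Test | Programmers/땅따먹기.py | solution
-- ===== SOURCE A (Python) =====
-- def solution(land):
--     answer = 0
--
--     for i in range(1, len(land)):
--         l = land[i - 1]
--         for j in range(len(land[0])):
--             temp_list = l[:]
--
--             del temp_list[j]
--
--             temp_max = max(temp_list)
--             land[i][j] = land[i][j] + temp_max
--
--     answer = max(land[len(land) - 1])
--
--     return answer
-- ===== SOURCE B (Python) =====
-- def solution(land):
--     # Track the top value and the best value excluding it from the previous
--     # accumulated row; O(n*m) instead of A's O(n*m^2). Does not mutate land.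
--     prev = list(land[0])
--     for row in land[1:]:
--         b1 = max(prev)
--         rest = list(prev)
--         rest.remove(b1)
--         b2 = max(rest)
--         prev = [v + (b2 if p == b1 else b1) for v, p in zip(row, prev)]
--     return max(prev)
-- ===== Notes on version B (the rewrite author's own statement) =====
-- stated objective: faster
-- what changed: B replaces A's per-column rescan of the previous row (copy, delete column j, take max) by computing the previous row's maximum and the best value with one occurrence of that maximum removed once per row, then picking between them per column; B also does not mutate land.
-- outside the precondition, e.g. on solution([[1, 2], [3, 4, 9]]): A returns 9, B returns 5
import Mathlib
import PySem

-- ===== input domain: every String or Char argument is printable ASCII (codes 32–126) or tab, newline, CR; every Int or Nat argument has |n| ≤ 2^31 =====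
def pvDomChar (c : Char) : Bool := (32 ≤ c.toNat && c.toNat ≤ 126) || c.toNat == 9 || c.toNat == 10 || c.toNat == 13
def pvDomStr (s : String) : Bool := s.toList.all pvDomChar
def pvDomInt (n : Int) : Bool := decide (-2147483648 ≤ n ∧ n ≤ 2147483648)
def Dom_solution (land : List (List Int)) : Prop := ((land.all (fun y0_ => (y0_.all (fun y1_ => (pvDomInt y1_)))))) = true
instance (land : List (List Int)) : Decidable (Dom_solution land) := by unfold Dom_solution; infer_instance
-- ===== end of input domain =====

-- B computes the previous row's maximum and the best value excluding one occurrence of it once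
-- per row instead of A's per-column rescan (asymptotically faster, measured by the check);
-- A mutates `land` in place, B does not — the equivalence is about the return value only.

-- max(xs) for a nonempty Int list (max([]) is a ValueError, excluded by Pre_)
def pvMaxD (l : List Int) : Int := (PySem.List.max? l (fun x => x)).getD 0

-- ===== PORT A =====
def solution (land : List (List Int)) : Int :=
  let g := (PySem.List.pyRange 1 (land.length : Int) 1).foldl (fun g i =>
      let l := PySem.List.pyGetD g (i - 1) []
      let row := (PySem.List.pyRange 0 ((PySem.List.pyGetD g 0 []).length : Int) 1).foldl
        (fun row j =>
          -- temp_list = l[:]; del temp_list[j]  (IndexError = none, excluded by Pre_)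
          let tempList := ((PySem.List.pop? (PySem.List.slice l none none) j).map (·.2)).getD []
          let tempMax := pvMaxD tempList
          PySem.List.pySetD row j (PySem.List.pyGetD row j 0 + tempMax))
        (PySem.List.pyGetD g i [])
      PySem.List.pySetD g i row) land
  pvMaxD (PySem.List.pyGetD g ((g.length : Int) - 1) [])

-- ===== PORT B =====
def solution_alt (land : List (List Int)) : Int :=
  let prev0 := PySem.List.pyGetD land 0 []
  let last := (PySem.List.slice land (some 1) none).foldl (fun prev row =>
      let b1 := pvMaxD prev
      let rest := (PySem.List.remove? prev b1).getD []
      let b2 := pvMaxD rest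
      (row.zip prev).map (fun vp => vp.1 + (if vp.2 == b1 then b2 else b1))) prev0
  pvMaxD last

-- ===== PRECONDITION & SPEC =====
-- Pre_ excludes ragged inputs (rows of unequal length): there A's use of the first row's
-- width is accidental (it may return a value mixing updated and untouched cells, or raise);
-- the remaining conjuncts exclude exactly the inputs where A raises (empty land, an empty
-- first row, or several rows of width 1, where max of an emptied list is a ValueError).
def Pre_solution (land : List (List Int)) : Prop :=
  land ≠ [] ∧ (∀ r ∈ land, r.length = (land.headD []).length) ∧
  1 ≤ (land.headD []).length ∧ (2 ≤ land.length → 2 ≤ (land.headD []).length)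
instance (land : List (List Int)) : Decidable (Pre_solution land) := by
  unfold Pre_solution; infer_instance
def pvWitness_solution : List (List Int) := [[1, 2, 3, 5], [5, 6, 7, 8], [4, 3, 2, 1]]

def Spec_solution (land : List (List Int)) (out : Int) : Prop := out = solution_alt land
instance (land : List (List Int)) (out : Int) : Decidable (Spec_solution land out) := by
  unfold Spec_solution; infer_instance

-- ===== CLAIM (what is proved, stated in full; the proofs are below) =====
def Claim_equal_solution : Prop := ∀ (land : List (List Int)), Dom_solution land → Pre_solution land → Spec_solution land (solution land)

-- ===== LEMMAS AND PROOFS =====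

-- closed form of one row update: add to each cell the max of the previous row without that column
def pvStep (p row : List Int) : List Int :=
  row.mapIdx (fun j v => v + pvMaxD (p.eraseIdx j))

def pvRows (p : List Int) : List (List Int) → List (List Int)
  | [] => []
  | r :: t => pvStep p r :: pvRows (pvStep p r) t

theorem pvMaxD_mem {l : List Int} (h : l ≠ []) : pvMaxD l ∈ l := by
  unfold pvMaxD
  cases hm : PySem.List.max? l (fun x => x) with
  | none => exact absurd ((PySem.List.max?_eq_none_iff l _).mp hm) h
  | some m => simpa using PySem.List.max?_mem hm

theorem pvMaxD_isMax {l : List Int} : ∀ y ∈ l, y ≤ pvMaxD l := by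
  intro y hy
  unfold pvMaxD
  cases hm : PySem.List.max? l (fun x => x) with
  | none => rw [(PySem.List.max?_eq_none_iff l _).mp hm] at hy; simp at hy
  | some m => simpa using PySem.List.max?_isMax hm y hy

theorem pvMaxD_eq_of {l : List Int} {x : Int} (h1 : x ∈ l) (h2 : ∀ y ∈ l, y ≤ x) :
    pvMaxD l = x := by
  have h3 := pvMaxD_isMax x h1
  have h4 := h2 _ (pvMaxD_mem (by rintro rfl; simp at h1))
  omega

theorem pvMaxD_perm {l l' : List Int} (h : l.Perm l') : pvMaxD l = pvMaxD l' := by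
  rcases eq_or_ne l' [] with rfl | hne'
  · have : l = [] := List.length_eq_zero_iff.mp (by simpa using h.length_eq)
    simp [this]
  · have hne : l ≠ [] := by
      rintro rfl
      exact hne' (List.length_eq_zero_iff.mp (by simpa using h.length_eq.symm))
    refine (pvMaxD_eq_of (h.mem_iff.mp (pvMaxD_mem hne)) ?_).symm
    intro y hy; exact pvMaxD_isMax y (h.mem_iff.mpr hy)

theorem pvRemove_eq_erase (v : Int) (p : List Int) (h : v ∈ p) :
    (PySem.List.remove? p v).getD [] = p.erase v := by
  unfold PySem.List.remove?
  rw [List.erase_eq_eraseIdx]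
  cases h' : List.idxOf? v p with
  | none => exact absurd (List.idxOf?_eq_none_iff.mp h') (by simpa using h)
  | some i => simp

theorem pvKey {p : List Int} (hw : 2 ≤ p.length) {j : Nat} (hj : j < p.length) :
    pvMaxD (p.eraseIdx j) =
      (if p[j] = pvMaxD p then pvMaxD ((PySem.List.remove? p (pvMaxD p)).getD []) else pvMaxD p) := by
  have hne : p ≠ [] := by rintro rfl; simp at hj
  have hMmem := pvMaxD_mem hne
  rw [pvRemove_eq_erase _ _ hMmem]
  split_ifs with h
  · -- p[j] is the maximum: eraseIdx j ~ erase (max)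
    apply pvMaxD_perm
    have h1 : (p.eraseIdx j).Perm (p.erase (pvMaxD p)) := by
      have e1 : p = p.take j ++ p[j] :: p.drop (j + 1) := by
        rw [List.getElem_cons_drop, List.take_append_drop]
      have h2 : (pvMaxD p :: p.eraseIdx j).Perm p := by
        rw [List.eraseIdx_eq_take_drop_succ]
        calc (pvMaxD p :: (p.take j ++ p.drop (j + 1))).Perm
              (p.take j ++ pvMaxD p :: p.drop (j + 1)) := List.perm_middle.symm
          _ = p := by rw [← h, ← e1]
      have h3 : p.Perm (pvMaxD p :: p.erase (pvMaxD p)) := List.perm_cons_erase hMmem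
      exact (h2.trans h3).cons_inv
    exact h1
  · -- otherwise the maximum survives
    apply pvMaxD_eq_of
    · rw [List.mem_eraseIdx_iff_getElem]
      obtain ⟨i, hi, hgi⟩ := List.mem_iff_getElem.mp hMmem
      exact ⟨i, hi, by rintro rfl; exact h hgi, hgi⟩
    · intro y hy
      exact pvMaxD_isMax y (List.mem_of_mem_eraseIdx hy)

theorem pvInnerGen (f : Nat → Int → Int) :
    ∀ (suf pre : List Int),
      (List.range' pre.length suf.length).foldl
          (fun r j => r.set j (f j (r.getD j 0))) (pre ++ suf)
        = pre ++ suf.mapIdx (fun k v => f (pre.length + k) v) := by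
  intro suf
  induction suf with
  | nil => intro pre; simp
  | cons v t ih =>
    intro pre
    rw [List.length_cons, List.range'_succ, List.foldl_cons]
    have hget : (pre ++ v :: t).getD pre.length 0 = v := by
      simp [List.getD]
    have hset : (pre ++ v :: t).set pre.length (f pre.length v) =
        (pre ++ [f pre.length v]) ++ t := by
      rw [List.set_append_right _ _ (le_refl _)]
      simp
    rw [hget, hset]
    have := ih (pre ++ [f pre.length v])
    simp only [List.length_append, List.length_cons, List.length_nil,
      Nat.zero_add] at this ⊢
    rw [this]
    simp only [List.mapIdx_cons, List.append_assoc, List.singleton_append]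
    congr 1
    have harith : (fun k (v : Int) => f (pre.length + 1 + k) v)
        = fun i v => f (pre.length + (i + 1)) v := by
      funext k v; congr 1; omega
    rw [harith]
    simp

theorem pvInnerA {p row : List Int} {w : Nat} (hp : p.length = w) (hrow : row.length = w) :
    (PySem.List.pyRange 0 (w : Int) 1).foldl
        (fun r j =>
          PySem.List.pySetD r j (PySem.List.pyGetD r j 0 +
            pvMaxD (((PySem.List.pop? (PySem.List.slice p none none) j).map (·.2)).getD [])))
        row
      = pvStep p row := by
  rw [PySem.List.pyRange_one]
  rw [List.foldl_map]
  have hcongr : ∀ (r : List Int) (k : Nat), k ∈ List.range (((w : Int) - 0).toNat) →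
      PySem.List.pySetD r ((0 : Int) + (k : Int)) (PySem.List.pyGetD r ((0 : Int) + (k : Int)) 0 +
        pvMaxD (((PySem.List.pop? (PySem.List.slice p none none) ((0 : Int) + (k : Int))).map (·.2)).getD []))
      = r.set k (r.getD k 0 + pvMaxD (p.eraseIdx k)) := by
    intro r k hk
    have hkw : k < w := by simpa using hk
    have hpop : PySem.List.pop? (PySem.List.slice p none none) ((0 : Int) + (k : Int))
        = some (p[k]'(by omega), p.eraseIdx k) := by
      rw [PySem.List.slice_none_none, zero_add, PySem.List.pop?_natCast p k (by omega)]
    rw [hpop]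
    simp
  rw [PySem.List.foldl_congr_mem _ _ (fun r k => r.set k (r.getD k 0 + pvMaxD (p.eraseIdx k))) _ (fun acc x hx => hcongr acc x hx)]
  have := pvInnerGen (fun k v => v + pvMaxD (p.eraseIdx k)) row []
  simp only [List.length_nil, List.nil_append] at this
  rw [show ((w : Int) - 0).toNat = w by omega, ← hrow, List.range_eq_range', this]
  simp [pvStep]

theorem pvStep_length (p row : List Int) : (pvStep p row).length = row.length := by
  simp [pvStep]

theorem pvInnerB {p row : List Int} {w : Nat} (hw : 2 ≤ w) (hp : p.length = w)
    (hrow : row.length = w) :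
    ((row.zip p).map (fun vp => vp.1 +
        (if vp.2 == pvMaxD p then pvMaxD ((PySem.List.remove? p (pvMaxD p)).getD [])
         else pvMaxD p)))
      = pvStep p row := by
  apply List.ext_getElem
  · simp [pvStep_length, hp, hrow]
  · intro i h1 h2
    have hi : i < w := by rw [pvStep_length, hrow] at h2; exact h2
    simp only [List.getElem_map, List.getElem_zip, pvStep, List.getElem_mapIdx]
    rw [pvKey (by omega) (by omega)]
    simp [beq_iff_eq]

theorem pvRows_getLast (p : List Int) (rows : List (List Int)) :
    (p :: pvRows p rows).getLast (by simp) = rows.foldl pvStep p := by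
  induction rows generalizing p with
  | nil => simp [pvRows]
  | cons r t ih =>
    rw [pvRows, List.foldl_cons, ← ih (pvStep p r)]
    rfl

theorem pvGridA {w : Nat} :
    ∀ (rest done : List (List Int)) (hd : done ≠ []),
      (∀ r ∈ done, r.length = w) → (∀ r ∈ rest, r.length = w) →
      (PySem.List.pyRange (done.length : Int) ((done.length : Int) + (rest.length : Int)) 1).foldl
          (fun g i =>
            PySem.List.pySetD g i
              ((PySem.List.pyRange 0 ((PySem.List.pyGetD g 0 []).length : Int) 1).foldl
                (fun row j =>
                  PySem.List.pySetD row j (PySem.List.pyGetD row j 0 +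
                    pvMaxD (((PySem.List.pop? (PySem.List.slice
                      (PySem.List.pyGetD g (i - 1) []) none none) j).map (·.2)).getD [])))
                (PySem.List.pyGetD g i [])))
          (done ++ rest)
        = done ++ pvRows (done.getLast hd) rest := by
  intro rest
  induction rest with
  | nil =>
    intro done hd _ _
    rw [PySem.List.pyRange_one_eq_nil (by simp)]
    simp [pvRows]
  | cons r t ih =>
    intro done hd hdone hrest
    have hdl : 0 < done.length := List.length_pos_iff.mpr hd
    -- peel the first index i = done.length
    rw [PySem.List.pyRange_one_cons (by push_cast [List.length_cons]; omega), List.foldl_cons]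
    -- simplify the state after one step
    have hg0 : PySem.List.pyGetD (done ++ r :: t) (0 : Int) [] = done.headD [] := by
      rw [PySem.List.pyGetD_zero]
      cases done with
      | nil => simp at hd
      | cons d ds => simp
    have hgi : PySem.List.pyGetD (done ++ r :: t) ((done.length : Int)) [] = r := by
      rw [PySem.List.pyGetD_natCast]
      simp [List.getD]
    have hgl : PySem.List.pyGetD (done ++ r :: t) ((done.length : Int) - 1) []
        = done.getLast hd := by
      rw [show ((done.length : Int) - 1) = ((done.length - 1 : Nat) : Int) by omega,
        PySem.List.pyGetD_natCast]
      rw [List.getD_eq_getElem _ _ (by simp; omega)]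
      rw [List.getElem_append_left (by omega)]
      exact (List.getLast_eq_getElem hd).symm
    have hhead : (done.headD []).length = w := by
      cases done with
      | nil => simp at hd
      | cons d ds => exact hdone d (by simp)
    have hlast : (done.getLast hd).length = w := hdone _ (List.getLast_mem hd)
    have hr : r.length = w := hrest r (by simp)
    rw [hg0, hgi, hgl, hhead]
    rw [pvInnerA hlast hr]
    have hset : PySem.List.pySetD (done ++ r :: t) ((done.length : Int))
        (pvStep (done.getLast hd) r) = (done ++ [pvStep (done.getLast hd) r]) ++ t := by
      rw [PySem.List.pySetD_natCast]
      rw [List.set_append_right _ _ (le_refl _)]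
      simp
    rw [hset]
    have hd' : (done ++ [pvStep (done.getLast hd) r]) ≠ [] := by simp
    have := ih (done ++ [pvStep (done.getLast hd) r]) hd'
      (by
        intro x hx
        rcases List.mem_append.mp hx with hx | hx
        · exact hdone x hx
        · simp at hx; subst hx; rw [pvStep_length]; exact hr)
      (fun x hx => hrest x (by simp [hx]))
    have hlen : ((done ++ [pvStep (done.getLast hd) r]).length : Int) = (done.length : Int) + 1 := by
      simp
    rw [hlen] at this
    rw [show (done.length : Int) + ((r :: t).length : Int) = ((done.length : Int) + 1) + (t.length : Int) by simp; omega]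
    rw [this]
    have hgetlast : (done ++ [pvStep (done.getLast hd) r]).getLast hd' = pvStep (done.getLast hd) r := by
      simp
    rw [hgetlast]
    simp [pvRows]

theorem pvRows_length (p : List Int) (rows : List (List Int)) :
    (pvRows p rows).length = rows.length := by
  induction rows generalizing p with
  | nil => simp [pvRows]
  | cons r t ih => rw [pvRows]; simp [ih]

theorem pvFoldB {w : Nat} :
    ∀ (rows : List (List Int)) (p : List Int), p.length = w →
      (∀ r ∈ rows, r.length = w) → (rows ≠ [] → 2 ≤ w) →
      rows.foldl (fun prev row =>
          (row.zip prev).map (fun vp => vp.1 +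
            (if vp.2 == pvMaxD prev then
                pvMaxD ((PySem.List.remove? prev (pvMaxD prev)).getD [])
              else pvMaxD prev))) p
        = rows.foldl pvStep p := by
  intro rows
  induction rows with
  | nil => intro p _ _ _; rfl
  | cons r t ih =>
    intro p hp hlen hw2
    have hw : 2 ≤ w := hw2 (by simp)
    rw [List.foldl_cons, List.foldl_cons,
      pvInnerB hw hp (hlen r (by simp))]
    exact ih (pvStep p r) (by rw [pvStep_length]; exact hlen r (by simp))
      (fun x hx => hlen x (by simp [hx])) (fun _ => hw)

-- the grid layout helper lemmas above assemble into the verdict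

-- ===== VERDICT (by name: the statement is the Claim_ definition above) =====
theorem solution_spec : Claim_equal_solution := by
  intro land _hDom hPre
  obtain ⟨hne, hlen, hw1, hw2⟩ := hPre
  unfold Spec_solution
  cases land with
  | nil => exact absurd rfl hne
  | cons r0 rest =>
    have hhead : (r0 :: rest).headD [] = r0 := rfl
    rw [hhead] at hlen hw1 hw2
    -- A's side: the grid fold, via the invariant with done = [r0]
    have hgrid := pvGridA (w := r0.length) rest [r0] (by simp)
      (by intro x hx; simp at hx; simp [hx])
      (by intro x hx; exact hlen x (by simp [hx]))
    unfold solution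
    simp only []
    rw [show (r0 :: rest) = ([r0] : List (List Int)) ++ rest from rfl]
    have hrange : PySem.List.pyRange 1 ((([r0] : List (List Int)) ++ rest).length : Int) 1
        = PySem.List.pyRange (([r0] : List (List Int)).length : Int)
            ((([r0] : List (List Int)).length : Int) + (rest.length : Int)) 1 := by
      simp; congr 1; omega
    rw [hrange, hgrid]
    -- the final row of the grid is the fold of pvStep
    have hcons : ([r0] : List (List Int)) ++ pvRows (([r0] : List (List Int)).getLast (by simp)) rest
        = r0 :: pvRows r0 rest := by simp
    rw [hcons]
    have hlast : PySem.List.pyGetD (r0 :: pvRows r0 rest)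
        (((r0 :: pvRows r0 rest).length : Int) - 1) [] = rest.foldl pvStep r0 := by
      rw [show ((r0 :: pvRows r0 rest).length : Int) - 1 = ((rest.length : Nat) : Int) by
        simp [pvRows_length]]
      rw [PySem.List.pyGetD_natCast]
      have hidx : rest.length < (r0 :: pvRows r0 rest).length := by simp [pvRows_length]
      rw [List.getD_eq_getElem _ _ hidx, ← pvRows_getLast r0 rest, List.getLast_eq_getElem]
      congr 1
      simp [pvRows_length]
    rw [hlast]
    -- B's side
    unfold solution_alt
    simp only []
    rw [List.singleton_append]
    rw [PySem.List.pyGetD_zero_cons, PySem.List.slice_from_one]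
    have htail : (r0 :: rest).tail = rest := rfl
    rw [htail]
    rw [pvFoldB (w := r0.length) rest r0 rfl
      (fun x hx => hlen x (by simp [hx]))
      (fun hrne => hw2 (by cases rest with | nil => exact absurd rfl hrne | cons a b => simp))]
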